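-- pv_equiv track=rewrite | github.com/aridawoodi/Restaurant-Daily-Operation-Sales-Automation | csv_to_sheets.py | _column_index_to_a1
-- ===== SOURCE A (Python) =====
-- def _column_index_to_a1(col_idx: int) -> str:
--     """Convert column index (1-based) to A1 notation (e.g., 1 -> A, 2 -> B, 27 -> AA)."""
--     import string
--     col_letter = ''
--     col_num = col_idx
--     while col_num > 0:
--         col_num -= 1
--         col_letter = string.ascii_uppercase[col_num % 26] + col_letter
--         col_num //= 26
--     return col_letter
-- ===== SOURCE B (Python) =====
-- import string
--
-- def _column_index_to_a1(col_idx: int) -> str: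
--     """Convert column index (1-based) to A1 notation (e.g., 1 -> A, 2 -> B, 27 -> AA)."""
--     if col_idx <= 0:
--         return ''
--     q, r = divmod(col_idx - 1, 26)
--     return _column_index_to_a1(q) + string.ascii_uppercase[r]
-- ===== Notes on version B (the rewrite author's own statement) =====
-- stated objective: simpler
-- what changed: Replaces the while-loop with a mutable accumulator string by a direct recursion on the quotient: the recursive call yields the more-significant prefix and the letter for the remainder is appended after it.
import Mathlib
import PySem

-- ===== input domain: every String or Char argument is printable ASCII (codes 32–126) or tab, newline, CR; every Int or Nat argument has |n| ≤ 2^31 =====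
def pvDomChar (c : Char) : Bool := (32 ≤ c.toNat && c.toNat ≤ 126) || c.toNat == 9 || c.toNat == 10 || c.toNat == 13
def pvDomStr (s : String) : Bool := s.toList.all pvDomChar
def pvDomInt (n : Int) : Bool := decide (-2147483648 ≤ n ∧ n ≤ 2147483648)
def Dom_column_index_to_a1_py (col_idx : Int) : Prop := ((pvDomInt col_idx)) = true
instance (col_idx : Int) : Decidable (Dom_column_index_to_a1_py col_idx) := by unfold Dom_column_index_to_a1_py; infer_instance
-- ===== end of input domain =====

-- B replaces A's while-loop with accumulator by a direct recursion on the quotient (same cost, plainer decomposition).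


-- string.ascii_uppercase, as a list of characters
def pvUppercase : List Char := "ABCDEFGHIJKLMNOPQRSTUVWXYZ".toList

-- ===== PORT A =====
-- the while-loop of A: state (col_num, col_letter); indexing is always in range (0 ≤ n % 26 < 26)
def a1LoopA (col_num : Int) (col_letter : String) : String :=
  if h : col_num > 0 then
    let n := col_num - 1
    a1LoopA (PySem.Int.floordiv n 26)
      (String.mk [PySem.List.pyGetD pvUppercase (PySem.Int.mod n 26) 'A'] ++ col_letter)
  else col_letter
termination_by col_num.toNat
decreasing_by
  have h26 : (0:Int) < 26 := by omega
  have hle := Int.ediv_le_self (col_num - 1) (by omega : (0:Int) ≤ col_num - 1)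
  have := PySem.Int.floordiv_eq_ediv_of_pos (a := col_num - 1) h26
  omega

def column_index_to_a1_py (col_idx : Int) : String := a1LoopA col_idx ""

-- ===== PORT B =====
def column_index_to_a1_py_alt (col_idx : Int) : String :=
  if h : col_idx ≤ 0 then ""
  else
    column_index_to_a1_py_alt (PySem.Int.floordiv (col_idx - 1) 26) ++
      String.mk [PySem.List.pyGetD pvUppercase (PySem.Int.mod (col_idx - 1) 26) 'A']
termination_by col_idx.toNat
decreasing_by
  have h26 : (0:Int) < 26 := by omega
  have hle := Int.ediv_le_self (col_idx - 1) (by omega : (0:Int) ≤ col_idx - 1)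
  have := PySem.Int.floordiv_eq_ediv_of_pos (a := col_idx - 1) h26
  omega

-- ===== PRECONDITION & SPEC =====
def Spec_column_index_to_a1_py (col_idx : Int) (out : String) : Prop := out = column_index_to_a1_py_alt col_idx
instance (col_idx : Int) (out : String) : Decidable (Spec_column_index_to_a1_py col_idx out) := by unfold Spec_column_index_to_a1_py; infer_instance

-- ===== CLAIM (what is proved, stated in full; the proofs are below) =====
def Claim_equal_column_index_to_a1_py : Prop := ∀ (col_idx : Int), Dom_column_index_to_a1_py col_idx → Spec_column_index_to_a1_py col_idx (column_index_to_a1_py col_idx)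

-- ===== LEMMAS AND PROOFS =====

-- loop invariant: A's loop with accumulator acc equals B's recursion followed by acc
theorem a1LoopA_eq_alt_append (col_num : Int) (acc : String) :
    a1LoopA col_num acc = column_index_to_a1_py_alt col_num ++ acc := by
  by_cases h : col_num > 0
  · rw [a1LoopA, column_index_to_a1_py_alt]
    simp only [h, dif_pos, dif_neg (by omega : ¬ col_num ≤ 0)]
    rw [a1LoopA_eq_alt_append]
    rw [String.append_assoc]
  · rw [a1LoopA, column_index_to_a1_py_alt]
    simp only [h, dif_neg, dif_pos (by omega : col_num ≤ 0)]
    simp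
termination_by col_num.toNat
decreasing_by
  have h26 : (0:Int) < 26 := by omega
  have hle := Int.ediv_le_self (col_num - 1) (by omega : (0:Int) ≤ col_num - 1)
  have := PySem.Int.floordiv_eq_ediv_of_pos (a := col_num - 1) h26
  omega

-- ===== VERDICT (by name: the statement is the Claim_ definition above) =====
theorem column_index_to_a1_py_spec : Claim_equal_column_index_to_a1_py := by
  intro col_idx _
  unfold Spec_column_index_to_a1_py column_index_to_a1_py
  rw [a1LoopA_eq_alt_append]
  simp
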